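-- pv_equiv track=rewrite | github.com/xuefenghao5121/ArkProbe | arkprobe/hotspot/analyzer/pattern_matcher.py | _has_simd_opcodes
-- ===== SOURCE A (Python) =====
-- def _has_simd_opcodes(bytecode_hex: str) -> bool:
--     """Check if bytecode contains loop/array patterns suitable for SIMD.
--
--     Looks for JVM opcodes that indicate array access and arithmetic loops,
--     which are good candidates for SIMD vectorization in C++.
--     """
--     if not bytecode_hex:
--         return False
--     # JVM opcodes indicating array operations and loops
--     # 0x2a=aload_0, 0x32=aaload, 0x2b=aload_1, 0x1a=iload_0
--     # 0xbc=newarray, 0xbd=anewarray, 0xc5=multianewarray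
--     ARRAY_OPCODES = {"2a", "32", "2b", "1a", "bc", "bd", "c5"}
--     # JVM opcodes for arithmetic on int/float/double
--     # 0x60=iadd, 0x68=imul, 0x70=dmul, 0x6d=fadd, 0x6f=fmul
--     ARITH_OPCODES = {"60", "68", "70", "6d", "6f", "84"}
--     hex_clean = bytecode_hex.replace("0x", "").replace(" ", "")
--     if len(hex_clean) < 4:
--         return False
--     # Check byte pairs for array + arithmetic co-occurrence
--     has_array = any(op in hex_clean for op in ARRAY_OPCODES)
--     has_arith = any(op in hex_clean for op in ARITH_OPCODES)
--     return has_array and has_arith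
-- ===== SOURCE B (Python) =====
-- def _has_simd_opcodes(bytecode_hex: str) -> bool:
--     """Single left-to-right windowed scan instead of 13 repeated substring scans."""
--     if not bytecode_hex:
--         return False
--     ARRAY_OPCODES = {"2a", "32", "2b", "1a", "bc", "bd", "c5"}
--     ARITH_OPCODES = {"60", "68", "70", "6d", "6f", "84"}
--     hex_clean = bytecode_hex.replace("0x", "").replace(" ", "")
--     if len(hex_clean) < 4:
--         return False
--     has_array = False
--     has_arith = False
--     for a, b in zip(hex_clean, hex_clean[1:]):
--         pair = a + b
--         if pair in ARRAY_OPCODES: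
--             has_array = True
--         if pair in ARITH_OPCODES:
--             has_arith = True
--         if has_array and has_arith:
--             return True
--     return has_array and has_arith
-- ===== Notes on version B (the rewrite author's own statement) =====
-- stated objective: alternative
-- what changed: Replaces the 13 independent substring scans (one 'op in hex_clean' per opcode) with a single left-to-right pass over adjacent character windows that tracks both flags and returns early once both are set.
import Mathlib
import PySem

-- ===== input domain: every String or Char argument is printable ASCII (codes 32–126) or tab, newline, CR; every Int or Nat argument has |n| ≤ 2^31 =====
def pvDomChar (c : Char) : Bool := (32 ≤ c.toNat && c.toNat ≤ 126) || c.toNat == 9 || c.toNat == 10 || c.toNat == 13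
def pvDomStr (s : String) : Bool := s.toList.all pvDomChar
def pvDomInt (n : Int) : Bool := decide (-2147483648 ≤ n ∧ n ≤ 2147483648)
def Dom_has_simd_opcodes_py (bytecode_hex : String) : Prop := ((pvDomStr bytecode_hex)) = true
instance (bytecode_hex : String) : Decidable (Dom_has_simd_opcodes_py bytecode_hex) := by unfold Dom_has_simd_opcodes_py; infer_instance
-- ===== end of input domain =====

-- B replaces A's 13 independent substring scans with one windowed left-to-right pass (alternative decomposition).

-- ===== PORT A =====
def has_simd_opcodes_py (bytecode_hex : String) : Bool :=
  if bytecode_hex.toList = [] then false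
  else
    let hex_clean := PySem.Str.replace (PySem.Str.replace bytecode_hex "0x" "") " " ""
    if PySem.Str.len hex_clean < 4 then false
    else
      let has_array := PySem.Str.isIn "2a" hex_clean || PySem.Str.isIn "32" hex_clean ||
        PySem.Str.isIn "2b" hex_clean || PySem.Str.isIn "1a" hex_clean ||
        PySem.Str.isIn "bc" hex_clean || PySem.Str.isIn "bd" hex_clean ||
        PySem.Str.isIn "c5" hex_clean
      let has_arith := PySem.Str.isIn "60" hex_clean || PySem.Str.isIn "68" hex_clean ||
        PySem.Str.isIn "70" hex_clean || PySem.Str.isIn "6d" hex_clean ||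
        PySem.Str.isIn "6f" hex_clean || PySem.Str.isIn "84" hex_clean
      has_array && has_arith

-- ===== PORT B =====
-- the two opcode sets, as (first char, second char) pairs
def pvArrPairs : List (Char × Char) := [('2','a'), ('3','2'), ('2','b'), ('1','a'), ('b','c'), ('b','d'), ('c','5')]
def pvArithPairs : List (Char × Char) := [('6','0'), ('6','8'), ('7','0'), ('6','d'), ('6','f'), ('8','4')]

-- 'pair in OPCODES' (membership of the 2-char window in a set)
def pvPairMem (ps : List (Char × Char)) (a b : Char) : Bool := ps.any (fun p => p.1 == a && p.2 == b)

-- the single pass over zip(hex_clean, hex_clean[1:]) with early return once both flags hold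
def pvScan : List Char → Bool → Bool → Bool
  | c1 :: c2 :: rest, ha, hr =>
    let ha' := ha || pvPairMem pvArrPairs c1 c2
    let hr' := hr || pvPairMem pvArithPairs c1 c2
    if ha' && hr' then true else pvScan (c2 :: rest) ha' hr'
  | _, ha, hr => ha && hr

def has_simd_opcodes_py_alt (bytecode_hex : String) : Bool :=
  if bytecode_hex.toList = [] then false
  else
    let hex_clean := PySem.Str.replace (PySem.Str.replace bytecode_hex "0x" "") " " ""
    if PySem.Str.len hex_clean < 4 then false
    else pvScan hex_clean.toList false false

-- ===== PRECONDITION & SPEC =====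
def Spec_has_simd_opcodes_py (bytecode_hex : String) (out : Bool) : Prop := out = has_simd_opcodes_py_alt bytecode_hex
instance (bytecode_hex : String) (out : Bool) : Decidable (Spec_has_simd_opcodes_py bytecode_hex out) := by unfold Spec_has_simd_opcodes_py; infer_instance

-- ===== CLAIM (what is proved, stated in full; the proofs are below) =====
def Claim_equal_has_simd_opcodes_py : Prop := ∀ (bytecode_hex : String), Dom_has_simd_opcodes_py bytecode_hex → Spec_has_simd_opcodes_py bytecode_hex (has_simd_opcodes_py bytecode_hex)

-- ===== LEMMAS AND PROOFS =====

-- does the 2-char pattern [a,b] occur at some adjacent window of l?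
def pvWin (a b : Char) : List Char → Bool
  | c1 :: c2 :: rest => (c1 == a && c2 == b) || pvWin a b (c2 :: rest)
  | _ => false

lemma pvWin_iff (a b : Char) (l : List Char) : pvWin a b l = true ↔ [a, b] <:+: l := by
  induction l with
  | nil => simp [pvWin]
  | cons c1 t ih =>
    cases t with
    | nil =>
      simp only [pvWin, Bool.false_eq_true, false_iff]
      intro h
      have := h.length_le
      simp at this
    | cons c2 rest =>
      rw [List.infix_cons_iff]
      constructor
      · intro h
        simp only [pvWin, Bool.or_eq_true, Bool.and_eq_true, beq_iff_eq] at h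
        rcases h with ⟨rfl, rfl⟩ | h
        · exact Or.inl (List.cons_prefix_cons.mpr ⟨rfl, List.cons_prefix_cons.mpr ⟨rfl, List.nil_prefix⟩⟩)
        · exact Or.inr (ih.mp h)
      · intro h
        simp only [pvWin, Bool.or_eq_true, Bool.and_eq_true, beq_iff_eq]
        rcases h with h | h
        · rcases List.cons_prefix_cons.mp h with ⟨rfl, h2⟩
          rcases List.cons_prefix_cons.mp h2 with ⟨rfl, _⟩
          exact Or.inl ⟨rfl, rfl⟩
        · exact Or.inr (ih.mpr h)

-- Python's 'ab in s' is exactly the windowed occurrence check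
lemma isIn_eq_pvWin (a b : Char) (l : List Char) : PySem.Chars.isIn [a, b] l = pvWin a b l := by
  cases h : pvWin a b l
  · exact (PySem.Chars.isIn_eq_false_iff _ _).mpr (fun hc => by simp [← pvWin_iff a b l, h] at hc)
  · exact (PySem.Chars.isIn_iff_infix _ _).mpr ((pvWin_iff a b l).mp h)

-- single-set window scan (one flag of pvScan, without the accumulator)
def pvScanGen (ps : List (Char × Char)) : List Char → Bool
  | c1 :: c2 :: rest => pvPairMem ps c1 c2 || pvScanGen ps (c2 :: rest)
  | _ => false

-- a window scan over a pair set is the OR of the per-pair window scans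
lemma pvScanGen_or (ps : List (Char × Char)) (l : List Char) :
    pvScanGen ps l = ps.any (fun p => pvWin p.1 p.2 l) := by
  induction l with
  | nil => simp [pvScanGen, pvWin]
  | cons c1 t ih =>
    cases t with
    | nil => simp [pvScanGen, pvWin]
    | cons c2 rest =>
      rw [Bool.eq_iff_iff]
      simp only [pvScanGen, pvPairMem, ih, pvWin, List.any_eq_true, Bool.or_eq_true,
        Bool.and_eq_true, beq_iff_eq]
      constructor
      · rintro ((⟨p, hp, h1, h2⟩) | (⟨p, hp, h⟩))
        · exact ⟨p, hp, Or.inl ⟨h1.symm, h2.symm⟩⟩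
        · exact ⟨p, hp, Or.inr h⟩
      · rintro ⟨p, hp, (⟨h1, h2⟩ | h)⟩
        · exact Or.inl ⟨p, hp, h1.symm, h2.symm⟩
        · exact Or.inr ⟨p, hp, h⟩

-- the accumulator/early-exit pass computes the conjunction of the two flag scans
lemma pvScan_inv (l : List Char) (ha hr : Bool) :
    pvScan l ha hr = ((ha || pvScanGen pvArrPairs l) && (hr || pvScanGen pvArithPairs l)) := by
  induction l generalizing ha hr with
  | nil => simp [pvScan, pvScanGen]
  | cons c1 t ih =>
    cases t with
    | nil => simp [pvScan, pvScanGen]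
    | cons c2 rest =>
      simp only [pvScan, pvScanGen]
      by_cases h : ((ha || pvPairMem pvArrPairs c1 c2) && (hr || pvPairMem pvArithPairs c1 c2)) = true
      · rw [if_pos h]
        rcases Bool.and_eq_true .. |>.mp h with ⟨h1, h2⟩
        rcases Bool.or_eq_true .. |>.mp h1 with h1 | h1 <;>
          rcases Bool.or_eq_true .. |>.mp h2 with h2 | h2 <;>
          simp [h1, h2]
      · rw [if_neg h, ih]
        cases ha <;> cases hr <;> cases hA : pvPairMem pvArrPairs c1 c2 <;>
          cases hR : pvPairMem pvArithPairs c1 c2 <;> simp_all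

-- ===== VERDICT (by name: the statement is the Claim_ definition above) =====
theorem has_simd_opcodes_py_spec : Claim_equal_has_simd_opcodes_py := by
  intro s _
  unfold Spec_has_simd_opcodes_py has_simd_opcodes_py has_simd_opcodes_py_alt
  by_cases h0 : s.toList = []
  · simp [h0]
  rw [if_neg h0, if_neg h0]
  by_cases h4 : PySem.Str.len (PySem.Str.replace (PySem.Str.replace s "0x" "") " " "") < 4
  · simp only [if_pos h4]
  rw [if_neg h4, if_neg h4]
  rw [pvScan_inv, Bool.false_or, Bool.false_or, pvScanGen_or, pvScanGen_or]
  simp only [pvArrPairs, pvArithPairs, List.any_cons, List.any_nil, Bool.or_false,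
    ← isIn_eq_pvWin, PySem.Str.isIn_eq, Bool.or_assoc]
  rfl
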